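-- pv_equiv track=rewrite | github.com/macho715/GETS-Logistics-API | api/document_status.py | build_document_status
-- ===== SOURCE A (Python) =====
-- from typing import Dict, List, Optional
--
-- def build_document_status(documents: List[Dict]) -> Dict[str, str]:
--     """
--     Build document status dict from Documents records
--
--     Returns:
--         {"boeStatus": "SUBMITTED", "doStatus": "NOT_STARTED", ...}
--     """
--     doc_types = ["BOE", "DO", "COO", "HBL", "CIPL"]
--     doc_status = {}
--
--     for doc_type in doc_types:
--         doc = next(
--             (d for d in documents if d.get("fields", {}).get("docType") == doc_type),
--             None,
--         )
--         if doc: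
--             status = doc["fields"].get("status", "UNKNOWN")
--         else:
--             status = "UNKNOWN"
--
--         doc_status[f"{doc_type.lower()}Status"] = status
--
--     return doc_status
-- ===== SOURCE B (Python) =====
-- def build_document_status(documents):
--     """Build document status dict from Documents records (single pass over documents)."""
--     doc_types = ["BOE", "DO", "COO", "HBL", "CIPL"]
--     found = {}
--     for d in documents:
--         f = d.get("fields", {})
--         dt = f.get("docType")
--         if dt is not None and dt in doc_types and dt not in found:
--             found[dt] = f.get("status", "UNKNOWN")
--     return {f"{t.lower()}Status": found.get(t, "UNKNOWN") for t in doc_types}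
-- ===== Notes on version B (the rewrite author's own statement) =====
-- stated objective: alternative
-- what changed: B replaces A's five independent scans of documents (one next(...) per doc type) with a single pass that indexes the first status per known docType into a dict, then a constant-size loop over the five types; measured speed was about the same.
import Mathlib
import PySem

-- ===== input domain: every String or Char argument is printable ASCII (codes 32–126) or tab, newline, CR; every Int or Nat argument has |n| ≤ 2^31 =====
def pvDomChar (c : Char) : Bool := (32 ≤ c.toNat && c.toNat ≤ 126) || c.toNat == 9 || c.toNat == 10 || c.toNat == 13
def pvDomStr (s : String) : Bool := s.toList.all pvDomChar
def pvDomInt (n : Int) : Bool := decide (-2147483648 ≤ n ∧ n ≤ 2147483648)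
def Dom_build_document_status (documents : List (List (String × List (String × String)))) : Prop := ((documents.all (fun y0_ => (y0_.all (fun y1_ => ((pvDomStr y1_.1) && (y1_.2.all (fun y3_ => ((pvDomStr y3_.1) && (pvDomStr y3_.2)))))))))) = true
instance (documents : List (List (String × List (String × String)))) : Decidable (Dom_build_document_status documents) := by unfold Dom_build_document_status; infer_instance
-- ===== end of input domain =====

-- B replaces A's five per-type scans of `documents` by one indexing pass over it (objective: alternative single-pass structure).

-- ===== PORT A =====
-- helper: Python d.get(k) / d.get(k, dflt) on a dict (first match on the association list)
def pvDictGet? {v : Type} (d : List (String × v)) (k : String) : Option v :=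
  (PySem.Dict.mk d).get? k
def pvDictGetD {v : Type} (d : List (String × v)) (k : String) (dflt : v) : v :=
  (PySem.Dict.mk d).getD k dflt

def build_document_status (documents : List (List (String × List (String × String)))) : List (String × String) :=
  let doc_types := ["BOE", "DO", "COO", "HBL", "CIPL"]
  let doc_status : PySem.Dict String String := PySem.Dict.empty
  (doc_types.foldl (fun doc_status doc_type =>
    -- doc = next((d for d in documents if d.get("fields", {}).get("docType") == doc_type), None)
    let doc := documents.find? (fun d =>
      pvDictGet? (pvDictGetD d "fields" []) "docType" == some doc_type)
    let status :=
      match doc with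
      | some d =>
          -- Python `if doc:` is false on an empty dict; in the true branch doc["fields"] is
          -- present (the match required fields["docType"] == doc_type), so getD [] is exact here
          if d.isEmpty then "UNKNOWN"
          else pvDictGetD (pvDictGetD d "fields" []) "status" "UNKNOWN"
      | none => "UNKNOWN"
    doc_status.insert (PySem.Str.lower doc_type ++ "Status") status) doc_status).items

-- ===== PORT B =====
def build_document_status_alt (documents : List (List (String × List (String × String)))) : List (String × String) :=
  let doc_types := ["BOE", "DO", "COO", "HBL", "CIPL"]
  let found : PySem.Dict String String := documents.foldl (fun found d =>
    let f := pvDictGetD d "fields" []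
    match pvDictGet? f "docType" with
    | some dt =>
        if dt ∈ doc_types ∧ (found.get? dt).isNone
        then found.insert dt (pvDictGetD f "status" "UNKNOWN")
        else found
    | none => found) PySem.Dict.empty
  (doc_types.foldl (fun acc t =>
    acc.insert (PySem.Str.lower t ++ "Status") (found.getD t "UNKNOWN")) PySem.Dict.empty).items

-- ===== PRECONDITION & SPEC =====
def Spec_build_document_status (documents : List (List (String × List (String × String)))) (out : List (String × String)) : Prop := out = build_document_status_alt documents
instance (documents : List (List (String × List (String × String)))) (out : List (String × String)) : Decidable (Spec_build_document_status documents out) := by unfold Spec_build_document_status; infer_instance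

-- ===== CLAIM (what is proved, stated in full; the proofs are below) =====
def Claim_equal_build_document_status : Prop := ∀ (documents : List (List (String × List (String × String)))), Dom_build_document_status documents → Spec_build_document_status documents (build_document_status documents)

-- ===== LEMMAS AND PROOFS =====

-- A's per-type status (the body of A's loop for one doc_type)
def pvStatusA (documents : List (List (String × List (String × String)))) (t : String) : String :=
  match documents.find? (fun d =>
      pvDictGet? (pvDictGetD d "fields" []) "docType" == some t) with
  | some d =>
      if d.isEmpty then "UNKNOWN"
      else pvDictGetD (pvDictGetD d "fields" []) "status" "UNKNOWN"
  | none => "UNKNOWN"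

-- one step of B's indexing pass
def pvStep (found : PySem.Dict String String) (d : List (String × List (String × String))) : PySem.Dict String String :=
  let f := pvDictGetD d "fields" []
  match pvDictGet? f "docType" with
  | some dt =>
      if dt ∈ ["BOE", "DO", "COO", "HBL", "CIPL"] ∧ (found.get? dt).isNone
      then found.insert dt (pvDictGetD f "status" "UNKNOWN")
      else found
  | none => found

-- B's indexing pass
def pvFound (documents : List (List (String × List (String × String)))) (found : PySem.Dict String String) : PySem.Dict String String :=
  documents.foldl pvStep found

-- core invariant: a lookup in B's index after scanning `documents` from state `found`
-- is the first-recorded value if present, else A's scan result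
theorem pvFound_getD (documents : List (List (String × List (String × String))))
    (found : PySem.Dict String String) (t : String)
    (ht : t ∈ ["BOE", "DO", "COO", "HBL", "CIPL"]) :
    (pvFound documents found).getD t "UNKNOWN"
      = (found.get? t).getD (pvStatusA documents t) := by
  induction documents generalizing found with
  | nil =>
      simp [pvFound, pvStatusA, PySem.Dict.getD_eq_get?_getD]
  | cons d docs ih =>
      rw [show pvFound (d :: docs) found = pvFound docs (pvStep found d) from rfl]
      rcases hdt : pvDictGet? (pvDictGetD d "fields" []) "docType" with _ | dt
      · -- no docType: B skips d, and A's find? skips d too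
        have hstep : pvStep found d = found := by simp [pvStep, hdt]
        have hstat : pvStatusA (d :: docs) t = pvStatusA docs t := by
          simp [pvStatusA, List.find?, hdt]
        rw [hstep, ih found, hstat]
      · by_cases hdteq : dt = t
        · subst hdteq
          -- d is the first match for this type
          have hne : d.isEmpty = false := by
            cases d with
            | nil => simp [pvDictGet?, pvDictGetD, PySem.Dict.get?, PySem.Dict.getD] at hdt
            | cons _ _ => rfl
          have hstat : pvStatusA (d :: docs) dt
              = pvDictGetD (pvDictGetD d "fields" []) "status" "UNKNOWN" := by
            simp [pvStatusA, List.find?, hdt, hne]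
          rcases hf : found.get? dt with _ | s
          · -- not yet recorded: B inserts d's status
            have hstep : pvStep found d
                = found.insert dt (pvDictGetD (pvDictGetD d "fields" []) "status" "UNKNOWN") := by
              simp [pvStep, hdt, ht, hf]
            rw [hstep, ih, hstat]
            simp [PySem.Dict.get?_insert_self]
          · -- already recorded: the earlier value wins on both sides
            have hstep : pvStep found d = found := by simp [pvStep, hdt, hf]
            rw [hstep, ih found, hf, hstat]
            simp
        · -- d's docType ≠ t: A's find? skips d; B either skips or inserts at a different key
          have hbe : (dt == t) = false := beq_eq_false_iff_ne.mpr hdteq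
          have hstat : pvStatusA (d :: docs) t = pvStatusA docs t := by
            simp [pvStatusA, List.find?, hdt, hbe]
          by_cases hc : dt ∈ ["BOE", "DO", "COO", "HBL", "CIPL"] ∧ (found.get? dt).isNone
          · have hstep : pvStep found d
                = found.insert dt (pvDictGetD (pvDictGetD d "fields" []) "status" "UNKNOWN") := by
              simp [pvStep, hdt, hc.1, hc.2]
            rw [hstep, ih, PySem.Dict.get?_insert_of_ne _ _ (Ne.symm hdteq), hstat]
          · have hstep : pvStep found d = found := by
              simp only [pvStep, hdt]
              rw [if_neg hc]
            rw [hstep, ih found, hstat]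

-- ===== VERDICT (by name: the statement is the Claim_ definition above) =====
theorem build_document_status_spec : Claim_equal_build_document_status := by
  intro documents _
  show build_document_status documents = build_document_status_alt documents
  have h : ∀ t, t ∈ (["BOE", "DO", "COO", "HBL", "CIPL"] : List String) →
      (pvFound documents PySem.Dict.empty).getD t "UNKNOWN" = pvStatusA documents t := by
    intro t ht
    rw [pvFound_getD documents PySem.Dict.empty t ht]
    simp [PySem.Dict.get?_empty]
  show (List.foldl (fun ds t => ds.insert (PySem.Str.lower t ++ "Status") (pvStatusA documents t))
          PySem.Dict.empty ["BOE", "DO", "COO", "HBL", "CIPL"]).items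
      = (List.foldl (fun acc t => acc.insert (PySem.Str.lower t ++ "Status")
            ((pvFound documents PySem.Dict.empty).getD t "UNKNOWN"))
          PySem.Dict.empty ["BOE", "DO", "COO", "HBL", "CIPL"]).items
  simp only [List.foldl_cons, List.foldl_nil]
  rw [h "BOE" (by simp), h "DO" (by simp), h "COO" (by simp), h "HBL" (by simp), h "CIPL" (by simp)]
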